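-- pv_equiv track=rewrite | github.com/angelovang/Soft_Uni_problems_solutions | Fundamental_05_2022/Fundamental_exerc/Text_procesing/Resheniq.py | is_winning
-- ===== SOURCE A (Python) =====
-- def is_winning(ticket):
--     if len(ticket) != 20:
--         return "invalid ticket"
--     left_side = ticket[:10]
--     right_side = ticket[10:]
--     winning_symbols = ['@', '#', '$', '^']
--     for winning_symbol in winning_symbols:
--         for repetition in range(10, 5, -1):
--             winning_symbol_repetition = winning_symbol * repetition
--             if winning_symbol_repetition in left_side and winning_symbol_repetition in right_side:
--                 if repetition == 10:
--                     return f'ticket "{ticket}" - {repetition}{winning_symbol} Jackpot!'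
--                 return f'ticket "{ticket}" - {repetition}{winning_symbol}'
--
--     return f'ticket "{ticket}" - no match'
-- ===== SOURCE B (Python) =====
-- def is_winning(ticket):
--     if len(ticket) != 20:
--         return "invalid ticket"
--     left_side = ticket[:10]
--     right_side = ticket[10:]
--     for sym in ['@', '#', '$', '^']:
--         m = min(_max_run(left_side, sym), _max_run(right_side, sym))
--         if m >= 6:
--             if m == 10:
--                 return f'ticket "{ticket}" - {m}{sym} Jackpot!'
--             return f'ticket "{ticket}" - {m}{sym}'
--     return f'ticket "{ticket}" - no match'
--
--
-- def _max_run(half, sym):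
--     best = 0
--     cur = 0
--     for ch in half:
--         cur = cur + 1 if ch == sym else 0
--         if cur > best:
--             best = cur
--     return best
-- ===== Notes on version B (the rewrite author's own statement) =====
-- stated objective: alternative
-- what changed: Replaces A's descending membership tests of symbol*repetition substrings (building 5 candidate strings per symbol and scanning each half for each) by a single pass per half computing the longest consecutive run of each symbol, then taking min(left_run, right_run) as the repetition.
import Mathlib
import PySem

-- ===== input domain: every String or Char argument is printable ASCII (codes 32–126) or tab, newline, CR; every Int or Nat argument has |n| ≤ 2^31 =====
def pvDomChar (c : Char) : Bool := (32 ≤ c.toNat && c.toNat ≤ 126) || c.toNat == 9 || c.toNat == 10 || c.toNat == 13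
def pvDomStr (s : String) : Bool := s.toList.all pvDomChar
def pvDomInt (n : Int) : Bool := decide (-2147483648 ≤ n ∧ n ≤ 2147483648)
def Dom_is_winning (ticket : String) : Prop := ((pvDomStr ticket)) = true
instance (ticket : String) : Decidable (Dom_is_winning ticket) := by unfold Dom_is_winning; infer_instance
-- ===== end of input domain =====

-- B replaces A's descending membership tests (symbol*rep in half) by a single-pass
-- longest-run count per half and takes min(left_run, right_run); alternative decomposition.

-- ===== PORT A =====
-- inner 'for repetition in range(10, 5, -1)' loop: returns the first matching formatted string
def aRepLoop (ticket : String) (sym : Char) (left right : String) : List Int → Option String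
  | [] => none
  | r :: rest =>
    let w := String.ofList (List.replicate r.toNat sym)   -- winning_symbol * repetition
    if PySem.Str.isIn w left && PySem.Str.isIn w right then
      if r == 10 then
        some ("ticket \"" ++ ticket ++ "\" - " ++ PySem.Int.toStr r ++ String.ofList [sym] ++ " Jackpot!")
      else
        some ("ticket \"" ++ ticket ++ "\" - " ++ PySem.Int.toStr r ++ String.ofList [sym])
    else aRepLoop ticket sym left right rest

-- outer 'for winning_symbol in winning_symbols' loop
def aSymLoop (ticket : String) (left right : String) : List Char → String
  | [] => "ticket \"" ++ ticket ++ "\" - no match"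
  | sym :: rest =>
    match aRepLoop ticket sym left right (PySem.List.pyRange 10 5 (-1)) with
    | some s => s
    | none => aSymLoop ticket left right rest

def is_winning (ticket : String) : String :=
  if PySem.Str.len ticket ≠ 20 then "invalid ticket"
  else
    aSymLoop ticket (PySem.Str.slice ticket none (some 10)) (PySem.Str.slice ticket (some 10) none)
      ['@', '#', '$', '^']

-- ===== PORT B =====
-- _max_run: single pass, longest consecutive run of sym
def bMaxRun (half : String) (sym : Char) : Nat :=
  (half.toList.foldl
    (fun (p : Nat × Nat) ch =>
      let cur := if ch == sym then p.2 + 1 else 0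
      (if cur > p.1 then cur else p.1, cur))
    (0, 0)).1

def bSymLoop (ticket : String) (left right : String) : List Char → String
  | [] => "ticket \"" ++ ticket ++ "\" - no match"
  | sym :: rest =>
    let m := min (bMaxRun left sym) (bMaxRun right sym)
    if 6 ≤ m then
      if m == 10 then
        "ticket \"" ++ ticket ++ "\" - " ++ PySem.Int.toStr (m : Int) ++ String.ofList [sym] ++ " Jackpot!"
      else
        "ticket \"" ++ ticket ++ "\" - " ++ PySem.Int.toStr (m : Int) ++ String.ofList [sym]
    else bSymLoop ticket left right rest

def is_winning_alt (ticket : String) : String :=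
  if PySem.Str.len ticket ≠ 20 then "invalid ticket"
  else
    bSymLoop ticket (PySem.Str.slice ticket none (some 10)) (PySem.Str.slice ticket (some 10) none)
      ['@', '#', '$', '^']

-- ===== PRECONDITION & SPEC =====
def Spec_is_winning (ticket : String) (out : String) : Prop := out = is_winning_alt ticket
instance (ticket : String) (out : String) : Decidable (Spec_is_winning ticket out) := by unfold Spec_is_winning; infer_instance

-- ===== CLAIM (what is proved, stated in full; the proofs are below) =====
def Claim_equal_is_winning : Prop := ∀ (ticket : String), Dom_is_winning ticket → Spec_is_winning ticket (is_winning ticket)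

-- ===== LEMMAS AND PROOFS =====

-- length of the leading run of c
def leadRun (c : Char) : List Char → Nat
  | [] => 0
  | x :: xs => if x = c then leadRun c xs + 1 else 0

-- longest run of c anywhere in the list
def maxRun (c : Char) : List Char → Nat
  | [] => 0
  | x :: xs => max (leadRun c (x :: xs)) (maxRun c xs)

lemma leadRun_le_maxRun (c : Char) (l : List Char) : leadRun c l ≤ maxRun c l := by
  cases l with
  | nil => exact le_refl _
  | cons x xs => exact le_max_left _ _

lemma leadRun_le_length (c : Char) (l : List Char) : leadRun c l ≤ l.length := by
  induction l with
  | nil => simp [leadRun]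
  | cons x xs ih => by_cases h : x = c <;> simp [leadRun, h]; omega

lemma maxRun_le_length (c : Char) (l : List Char) : maxRun c l ≤ l.length := by
  induction l with
  | nil => simp [maxRun]
  | cons x xs ih =>
    have h1 := leadRun_le_length c (x :: xs)
    simp only [maxRun]
    simp at h1 ⊢
    omega

lemma replicate_prefix_iff (c : Char) (r : Nat) (l : List Char) :
    List.replicate r c <+: l ↔ r ≤ leadRun c l := by
  induction r generalizing l with
  | zero => simp
  | succ n ih =>
    cases l with
    | nil => simp [List.replicate_succ, leadRun]
    | cons x xs =>
      rw [List.replicate_succ, List.cons_prefix_cons]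
      by_cases h : x = c
      · simp [leadRun, h, ih]
      · simp only [leadRun, if_neg h]
        simp
        exact fun hh => absurd hh.symm h

lemma replicate_infix_iff (c : Char) (r : Nat) (l : List Char) :
    List.replicate r c <:+: l ↔ r ≤ maxRun c l := by
  induction l with
  | nil => simp [maxRun, List.replicate_eq_nil_iff]
  | cons x xs ih =>
    rw [List.infix_cons_iff, ih, replicate_prefix_iff]
    simp only [maxRun]
    omega

lemma bMaxRun_fold (c : Char) (l : List Char) (best cur : Nat) (h : cur ≤ best) :
    (l.foldl
      (fun (p : Nat × Nat) ch =>
        let cur := if ch == c then p.2 + 1 else 0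
        (if cur > p.1 then cur else p.1, cur))
      (best, cur)).1 = max best (max (cur + leadRun c l) (maxRun c l)) := by
  induction l generalizing best cur with
  | nil => simp [leadRun, maxRun]; omega
  | cons x xs ih =>
    simp only [List.foldl_cons]
    by_cases hx : x = c
    · have hb : (x == c) = true := by simp [hx]
      simp only [hb, if_true]
      rw [ih (if cur + 1 > best then cur + 1 else best) (cur + 1) (by split <;> omega)]
      simp only [leadRun, maxRun, if_pos hx]
      split_ifs <;> omega
    · have hb : (x == c) = false := by simp [hx]
      simp only [hb, Bool.false_eq_true, if_false]
      rw [show (if (0:Nat) > best then (0:Nat) else best) = best from by split <;> omega]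
      rw [ih best 0 (Nat.zero_le _)]
      have hlm := leadRun_le_maxRun c xs
      simp only [leadRun, maxRun, if_neg hx]
      omega

lemma bMaxRun_eq (half : String) (c : Char) : bMaxRun half c = maxRun c half.toList := by
  unfold bMaxRun
  rw [bMaxRun_fold c half.toList 0 0 (le_refl _)]
  have := leadRun_le_maxRun c half.toList
  omega

lemma isIn_replicate (c : Char) (k : Nat) (s : String) :
    PySem.Str.isIn (String.ofList (List.replicate k c)) s = decide (k ≤ maxRun c s.toList) := by
  rcases hb : PySem.Str.isIn (String.ofList (List.replicate k c)) s with _ | _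
  · rw [eq_comm, decide_eq_false_iff_not]
    intro hk
    rw [← replicate_infix_iff] at hk
    have := (PySem.Str.isIn_iff_infix (String.ofList (List.replicate k c)) s).2 (by simpa using hk)
    rw [hb] at this; exact Bool.false_ne_true this
  · rw [eq_comm, decide_eq_true_eq]
    rw [← replicate_infix_iff (c := c)]
    have := (PySem.Str.isIn_iff_infix (String.ofList (List.replicate k c)) s).1 hb
    simpa using this

-- the descending inner loop of A returns exactly B's branch value for this symbol
lemma repLoop_eq (ticket : String) (sym : Char) (L R : String)
    (hL : L.toList.length = 10) :
    aRepLoop ticket sym L R [10, 9, 8, 7, 6] =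
      (if 6 ≤ min (bMaxRun L sym) (bMaxRun R sym) then
        some (if min (bMaxRun L sym) (bMaxRun R sym) == 10 then
          "ticket \"" ++ ticket ++ "\" - " ++ PySem.Int.toStr ((min (bMaxRun L sym) (bMaxRun R sym) : Nat) : Int) ++ String.ofList [sym] ++ " Jackpot!"
        else
          "ticket \"" ++ ticket ++ "\" - " ++ PySem.Int.toStr ((min (bMaxRun L sym) (bMaxRun R sym) : Nat) : Int) ++ String.ofList [sym])
      else none) := by
  have hcond : ∀ k : Nat,
      (PySem.Str.isIn (String.ofList (List.replicate k sym)) L &&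
       PySem.Str.isIn (String.ofList (List.replicate k sym)) R) =
      decide (k ≤ min (bMaxRun L sym) (bMaxRun R sym)) := by
    intro k
    rw [isIn_replicate, isIn_replicate, bMaxRun_eq, bMaxRun_eq]
    rcases Nat.le_total k (min (maxRun sym L.toList) (maxRun sym R.toList)) with h | h
    · simp only [le_min_iff] at h
      simp [h.1, h.2]
    · by_cases h1 : k ≤ maxRun sym L.toList <;> by_cases h2 : k ≤ maxRun sym R.toList <;>
        simp [h1, h2]
  set m := min (bMaxRun L sym) (bMaxRun R sym) with hm
  have hmle : m ≤ 10 := by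
    have := maxRun_le_length sym L.toList
    rw [hm, bMaxRun_eq, bMaxRun_eq]
    omega
  simp only [aRepLoop]
  rw [show ((10:Int).toNat) = 10 by rfl, show ((9:Int).toNat) = 9 by rfl,
      show ((8:Int).toNat) = 8 by rfl, show ((7:Int).toNat) = 7 by rfl,
      show ((6:Int).toNat) = 6 by rfl]
  rw [hcond 10, hcond 9, hcond 8, hcond 7, hcond 6]
  by_cases h6 : 6 ≤ m
  · interval_cases m
    all_goals simp
  · have : ¬ (10 ≤ m) := by omega
    simp only [decide_eq_true_eq]
    split_ifs <;> first | rfl | omega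

lemma symLoop_eq (ticket : String) (L R : String)
    (hL : L.toList.length = 10) (syms : List Char) :
    aSymLoop ticket L R syms = bSymLoop ticket L R syms := by
  induction syms with
  | nil => rfl
  | cons sym rest ih =>
    simp only [aSymLoop, bSymLoop]
    rw [show PySem.List.pyRange 10 5 (-1) = [10, 9, 8, 7, 6] from by decide]
    rw [repLoop_eq ticket sym L R hL]
    by_cases h6 : 6 ≤ min (bMaxRun L sym) (bMaxRun R sym)
    · simp [h6]
    · simp [h6, ih]

-- ===== VERDICT (by name: the statement is the Claim_ definition above) =====
theorem is_winning_spec : Claim_equal_is_winning := by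
  intro ticket _
  unfold Spec_is_winning is_winning is_winning_alt
  rw [PySem.Str.len_eq]
  by_cases hlen : (ticket.toList.length : Int) = 20
  · simp only [hlen, ne_eq, not_true_eq_false, if_false]
    have hlen20 : ticket.toList.length = 20 := by exact_mod_cast hlen
    have hL : (PySem.Str.slice ticket none (some 10)).toList.length = 10 := by
      have : (PySem.Str.slice ticket none (some 10)).toList = ticket.toList.take 10 := by
        simp [PySem.Str.slice, pysem]
      rw [this]; simp [hlen20]
    exact symLoop_eq ticket _ _ hL _
  · rw [if_pos hlen, if_pos hlen]
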